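-- pv_equiv track=rewrite | github.com/lennee/advent-of-code | 2015/day_3/present_delivery.py | deliver_presents_alternate
-- ===== SOURCE A (Python) =====
-- from collections import defaultdict
--
-- def update_index(cur_index, move):
--   index = cur_index
--   if move == ">": return (index[0] + 1, index[1])
--   if move == "<": return (index[0] - 1, index[1])
--   if move == "^": return (index[0], index[1] + 1)
--   if move == "v": return (index[0], index[1] - 1)
--   return index
--
-- def deliver_presents_alternate(delivery_input):
--   deliveries = defaultdict(int)
--   santa_index = (0, 0)
--   robo_index = (0, 0)
--   deliveries[f'{santa_index[0]},{santa_index[1]}'] += 2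
--   robo = False
--   for i in delivery_input:
--     index = robo_index if robo else santa_index
--     index = update_index(index, i)
--     deliveries[f'{index[0]},{index[1]}'] += 1
--     if robo:
--       robo_index = index
--     else:
--       santa_index = index
--
--     robo = not robo
--
--   return len(deliveries.keys())
-- ===== SOURCE B (Python) =====
-- def deliver_presents_alternate(delivery_input):
--   santa_moves = delivery_input[0::2]
--   robo_moves = delivery_input[1::2]
--   visited = {"0,0"}
--   for moves in (santa_moves, robo_moves):
--     x, y = 0, 0
--     for c in moves:
--       if c == ">": x += 1
--       elif c == "<": x -= 1
--       elif c == "^": y += 1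
--       elif c == "v": y -= 1
--       visited.add(f"{x},{y}")
--   return len(visited)
-- ===== Notes on version B (the rewrite author's own statement) =====
-- stated objective: alternative
-- what changed: Replaces A's single interleaved loop that toggles between the two deliverers and counts deliveries per house in a dict by slicing the input into the two parity sub-strings and walking each path independently, unioning the visited houses in one set.
import Mathlib
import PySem

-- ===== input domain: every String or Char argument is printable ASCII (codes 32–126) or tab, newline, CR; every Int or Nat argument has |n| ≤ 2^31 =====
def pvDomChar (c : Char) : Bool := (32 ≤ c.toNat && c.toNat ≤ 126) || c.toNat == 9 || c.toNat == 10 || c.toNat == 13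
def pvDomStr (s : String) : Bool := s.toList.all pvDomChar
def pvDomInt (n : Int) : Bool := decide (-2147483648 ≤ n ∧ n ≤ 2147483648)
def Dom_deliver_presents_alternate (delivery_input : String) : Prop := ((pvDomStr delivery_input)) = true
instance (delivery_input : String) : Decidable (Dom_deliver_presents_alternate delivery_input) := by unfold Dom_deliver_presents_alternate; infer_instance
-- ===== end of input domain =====

-- B replaces A's single interleaved toggling loop (a dict counting deliveries per house) by two
-- independent path walks over the parity slices of the input, unioned in one visited set (objective: alternative).

-- the f-string key f'{x},{y}' both programs build, as code points
def pvKey (p : Int × Int) : List Char :=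
  PySem.Int.toChars p.1 ++ ',' :: PySem.Int.toChars p.2

-- ===== PORT A =====
def update_index (cur_index : Int × Int) (move : Char) : Int × Int :=
  let index := cur_index
  if move = '>' then (index.1 + 1, index.2)
  else if move = '<' then (index.1 - 1, index.2)
  else if move = '^' then (index.1, index.2 + 1)
  else if move = 'v' then (index.1, index.2 - 1)
  else index

def pvAStep (st : PySem.Dict (List Char) Int × (Int × Int) × (Int × Int) × Bool) (i : Char) :
    PySem.Dict (List Char) Int × (Int × Int) × (Int × Int) × Bool :=
  let (deliveries, santa_index, robo_index, robo) := st
  let index := if robo then robo_index else santa_index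
  let index := update_index index i
  let deliveries := deliveries.modify (pvKey index) 0 (· + 1)
  if robo then (deliveries, santa_index, index, !robo)
  else (deliveries, index, robo_index, !robo)

def deliver_presents_alternate (delivery_input : String) : Int :=
  let deliveries : PySem.Dict (List Char) Int := PySem.Dict.empty
  let santa_index : Int × Int := (0, 0)
  let robo_index : Int × Int := (0, 0)
  let deliveries := deliveries.modify (pvKey santa_index) 0 (· + 2)
  let robo := false
  let st := delivery_input.toList.foldl pvAStep (deliveries, santa_index, robo_index, robo)
  (st.1.keys.length : Int)

-- ===== PORT B =====
def pvWalkStep (acc : (Int × Int) × PySem.Set (List Char)) (c : Char) :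
    (Int × Int) × PySem.Set (List Char) :=
  let (x, y) := acc.1
  let (x, y) :=
    if c = '>' then (x + 1, y)
    else if c = '<' then (x - 1, y)
    else if c = '^' then (x, y + 1)
    else if c = 'v' then (x, y - 1)
    else (x, y)
  ((x, y), acc.2.add (pvKey (x, y)))

def pvWalk (visited : PySem.Set (List Char)) (moves : List Char) : PySem.Set (List Char) :=
  (moves.foldl pvWalkStep ((0, 0), visited)).2

def deliver_presents_alternate_alt (delivery_input : String) : Int :=
  let l := delivery_input.toList
  let santa_moves := (PySem.List.slice? l (some 0) none 2).getD []
  let robo_moves := (PySem.List.slice? l (some 1) none 2).getD []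
  let visited := PySem.Set.empty.add (pvKey (0, 0))
  let visited := pvWalk visited santa_moves
  let visited := pvWalk visited robo_moves
  (visited.length : Int)

-- ===== PRECONDITION & SPEC =====
def Spec_deliver_presents_alternate (delivery_input : String) (out : Int) : Prop := out = deliver_presents_alternate_alt delivery_input
instance (delivery_input : String) (out : Int) : Decidable (Spec_deliver_presents_alternate delivery_input out) := by unfold Spec_deliver_presents_alternate; infer_instance

-- ===== CLAIM (what is proved, stated in full; the proofs are below) =====
def Claim_equal_deliver_presents_alternate : Prop := ∀ (delivery_input : String), Dom_deliver_presents_alternate delivery_input → Spec_deliver_presents_alternate delivery_input (deliver_presents_alternate delivery_input)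

-- ===== LEMMAS AND PROOFS =====

-- pvStride b l: the elements of l at even (b = true) / odd (b = false) positions
def pvStride {α : Type} : Bool → List α → List α
  | _, [] => []
  | true, a :: t => a :: pvStride false t
  | false, _ :: t => pvStride true t

-- the keys of the houses visited while walking moves from p (start excluded)
def pvPath (p : Int × Int) : List Char → List (List Char)
  | [] => []
  | c :: m => pvKey (update_index p c) :: pvPath (update_index p c) m

lemma pvWalkStep_eq (p : Int × Int) (v : PySem.Set (List Char)) (c : Char) :
    pvWalkStep (p, v) c = (update_index p c, v.add (pvKey (update_index p c))) := by
  cases p with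
  | mk x y =>
    simp only [pvWalkStep, update_index]

lemma mem_pvWalk (m : List Char) (p : Int × Int) (v : PySem.Set (List Char)) (k : List Char) :
    (k ∈ (m.foldl pvWalkStep (p, v)).2) ↔ k ∈ v ∨ k ∈ pvPath p m := by
  induction m generalizing p v with
  | nil => simp [pvPath]
  | cons c m ih =>
    rw [List.foldl_cons, pvWalkStep_eq, ih]
    simp only [PySem.Set.mem_add, pvPath, List.mem_cons]
    tauto

lemma nodup_pvWalk (m : List Char) (p : Int × Int) (v : PySem.Set (List Char))
    (hv : v.Nodup) : ((m.foldl pvWalkStep (p, v)).2).Nodup := by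
  induction m generalizing p v with
  | nil => exact hv
  | cons c m ih =>
    rw [List.foldl_cons, pvWalkStep_eq]
    exact ih _ _ (PySem.Set.nodup_add v _ hv)

lemma pvAStep_false (d : PySem.Dict (List Char) Int) (s r : Int × Int) (c : Char) :
    pvAStep (d, s, r, false) c =
      (d.modify (pvKey (update_index s c)) 0 (· + 1), update_index s c, r, true) := rfl

lemma pvAStep_true (d : PySem.Dict (List Char) Int) (s r : Int × Int) (c : Char) :
    pvAStep (d, s, r, true) c =
      (d.modify (pvKey (update_index r c)) 0 (· + 1), s, update_index r c, false) := rfl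

lemma mem_keys_foldl_A (l : List Char) (d : PySem.Dict (List Char) Int)
    (s r : Int × Int) (robo : Bool) (k : List Char) :
    (k ∈ (l.foldl pvAStep (d, s, r, robo)).1.keys) ↔
      k ∈ d.keys ∨ k ∈ pvPath (if robo then r else s) (pvStride true l)
        ∨ k ∈ pvPath (if robo then s else r) (pvStride false l) := by
  induction l generalizing d s r robo with
  | nil => simp [pvPath, pvStride]
  | cons c l ih =>
    cases robo with
    | false =>
      rw [List.foldl_cons, pvAStep_false, ih, PySem.Dict.keys_modify]
      simp only [PySem.Dict.mem_keys_insert, pvStride, pvPath, List.mem_cons,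
        if_true, if_false, Bool.false_eq_true]
      tauto
    | true =>
      rw [List.foldl_cons, pvAStep_true, ih, PySem.Dict.keys_modify]
      simp only [PySem.Dict.mem_keys_insert, pvStride, pvPath, List.mem_cons,
        if_true, if_false, Bool.false_eq_true]
      tauto

lemma nodup_keys_foldl_A (l : List Char) (d : PySem.Dict (List Char) Int)
    (s r : Int × Int) (robo : Bool) (hd : d.keys.Nodup) :
    ((l.foldl pvAStep (d, s, r, robo)).1).keys.Nodup := by
  induction l generalizing d s r robo with
  | nil => exact hd
  | cons c l ih =>
    cases robo with
    | false =>
      rw [List.foldl_cons, pvAStep_false]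
      apply ih
      rw [PySem.Dict.keys_modify]
      exact PySem.Dict.nodup_keys_insert _ _ _ hd
    | true =>
      rw [List.foldl_cons, pvAStep_true]
      apply ih
      rw [PySem.Dict.keys_modify]
      exact PySem.Dict.nodup_keys_insert _ _ _ hd

-- the filterMap characterisations of the two parity sublists
lemma pvParity_filterMap {α : Type} (l : List α) :
    ((List.range ((l.length + 1) / 2)).filterMap (fun k => l[2 * k]?) = pvStride true l)
    ∧ ((List.range (l.length / 2)).filterMap (fun k => l[2 * k + 1]?) = pvStride false l) := by
  induction l with
  | nil => simp [pvStride]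
  | cons a t ih =>
    constructor
    · have hcnt : ((a :: t).length + 1) / 2 = t.length / 2 + 1 := by
        simp [List.length_cons]; omega
      rw [hcnt, List.range_succ_eq_map, List.filterMap_cons]
      simp only [List.getElem?_cons_zero, Nat.mul_zero, List.filterMap_map]
      rw [show ((fun k => (a :: t)[2 * k]?) ∘ Nat.succ) = (fun k => t[2 * k + 1]?) from ?_]
      · rw [ih.2]; rfl
      · funext k
        have : 2 * Nat.succ k = (2 * k + 1) + 1 := by omega
        simp [Function.comp, this]
    · simp only [List.length_cons]
      rw [show (fun k => (a :: t)[2 * k + 1]?) = (fun k => t[2 * k]?) from ?_]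
      · rw [ih.1]; rfl
      · funext k; simp

lemma pvSlice_evens (l : List Char) :
    PySem.List.slice? l (some 0) none 2 = some (pvStride true l) := by
  have h := (pvParity_filterMap l).1
  simp only [PySem.List.slice?, PySem.List.sliceIndices]
  norm_num
  have hr : (if 0 < l.length then (((l.length : Int) + 2 - 1) / 2).toNat else 0)
      = (l.length + 1) / 2 := by split_ifs <;> omega
  have hf : (fun x : Nat => l[(2 * (x : Int)).toNat]?) = (fun k : Nat => l[2 * k]?) := by
    funext x; congr 1
  rw [hr, hf, h]

lemma pvSlice_odds (l : List Char) :
    PySem.List.slice? l (some 1) none 2 = some (pvStride false l) := by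
  have h := (pvParity_filterMap l).2
  cases l with
  | nil => rfl
  | cons a t =>
    simp only [PySem.List.slice?, PySem.List.sliceIndices]
    norm_num
    have hr : (if 0 < t.length then (((t.length : Int) + 2 - 1) / 2).toNat else 0)
        = (a :: t).length / 2 := by simp only [List.length_cons]; split_ifs <;> omega
    have hf : (fun x : Nat => (a :: t)[(1 + 2 * (x : Int)).toNat]?)
        = (fun k : Nat => (a :: t)[2 * k + 1]?) := by
      funext x; congr 1; omega
    rw [hr, hf, h]

lemma mem_pvWalk' (v : PySem.Set (List Char)) (m : List Char) (k : List Char) :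
    k ∈ pvWalk v m ↔ k ∈ v ∨ k ∈ pvPath (0, 0) m := mem_pvWalk m (0, 0) v k

lemma nodup_pvWalk' (v : PySem.Set (List Char)) (m : List Char) (hv : v.Nodup) :
    (pvWalk v m).Nodup := nodup_pvWalk m (0, 0) v hv

-- ===== VERDICT (by name: the statement is the Claim_ definition above) =====
theorem deliver_presents_alternate_spec : Claim_equal_deliver_presents_alternate := by
  intro s _
  unfold Spec_deliver_presents_alternate deliver_presents_alternate deliver_presents_alternate_alt
  simp only [pvSlice_evens, pvSlice_odds, Option.getD_some]
  have hd0 : (PySem.Dict.empty.modify (pvKey ((0 : Int), (0 : Int))) 0 (· + 2) :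
      PySem.Dict (List Char) Int).keys = [pvKey (0, 0)] := by
    rw [PySem.Dict.keys_modify]
    rfl
  have hnK : ((s.toList.foldl pvAStep
      (PySem.Dict.empty.modify (pvKey ((0 : Int), (0 : Int))) 0 (· + 2), (0, 0), (0, 0), false)).1).keys.Nodup := by
    apply nodup_keys_foldl_A
    rw [hd0]
    exact List.nodup_singleton _
  have hnV : (pvWalk (pvWalk (PySem.Set.empty.add (pvKey (0, 0))) (pvStride true s.toList))
      (pvStride false s.toList)).Nodup := by
    apply nodup_pvWalk'
    apply nodup_pvWalk'
    exact PySem.Set.nodup_add _ _ List.nodup_nil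
  have hmem : ∀ k, (k ∈ ((s.toList.foldl pvAStep
      (PySem.Dict.empty.modify (pvKey ((0 : Int), (0 : Int))) 0 (· + 2), (0, 0), (0, 0), false)).1).keys) ↔
      k ∈ pvWalk (pvWalk (PySem.Set.empty.add (pvKey (0, 0))) (pvStride true s.toList))
        (pvStride false s.toList) := by
    intro k
    rw [mem_keys_foldl_A, hd0, mem_pvWalk', mem_pvWalk']
    simp only [PySem.Set.mem_add, List.mem_singleton, if_false, Bool.false_eq_true]
    have hempty : ¬ k ∈ (PySem.Set.empty : PySem.Set (List Char)) := List.not_mem_nil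
    tauto
  have hperm := (List.perm_ext_iff_of_nodup hnK hnV).2 hmem
  exact_mod_cast hperm.length_eq
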